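-- pv_equiv track=rewrite | github.com/BernieHuang2008/AudioBook | books/prelude_to_foundation/code/ebook/read_ebook.py | split_ts
-- ===== SOURCE A (Python) =====
-- def split_ts(ts):
--     res = []
--
--     curr = 0
--     last = 0
--     while curr < len(ts):
--         if ts[curr] < ts[last]:
--             # means a new chapter
--             res.append(ts[last:curr])
--             last = curr
--         curr += 1
--
--     return res
-- ===== SOURCE B (Python) =====
-- def split_ts(ts):
--     res = []
--     buf = []
--     for x in ts:
--         if buf and x < buf[0]:
--             res.append(buf)
--             buf = [x]
--         else:
--             buf.append(x)
--     # the trailing buffer is intentionally not flushed, matching A's return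
--     return res
-- ===== Notes on version B (the rewrite author's own statement) =====
-- stated objective: idiomatic
-- what changed: Replaces index bookkeeping (curr/last) and list slicing with a direct value iteration that maintains the current segment as a buffer list, flushing it when a value drops below the segment's first element.
import Mathlib
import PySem

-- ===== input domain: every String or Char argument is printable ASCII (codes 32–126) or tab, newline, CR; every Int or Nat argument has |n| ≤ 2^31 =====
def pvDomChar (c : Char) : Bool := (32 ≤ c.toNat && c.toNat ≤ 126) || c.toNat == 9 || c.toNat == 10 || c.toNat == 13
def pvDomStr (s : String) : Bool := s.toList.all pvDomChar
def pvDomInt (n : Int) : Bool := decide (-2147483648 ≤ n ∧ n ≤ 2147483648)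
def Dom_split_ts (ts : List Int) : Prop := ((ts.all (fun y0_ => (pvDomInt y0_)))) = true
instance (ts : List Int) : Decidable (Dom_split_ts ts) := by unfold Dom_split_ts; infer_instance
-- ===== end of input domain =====

-- B replaces A's index bookkeeping (curr/last) and slicing with direct value iteration over a segment buffer (idiomatic; same O(n) cost).


-- ===== PORT A =====
-- while loop over indices curr/last; ts[curr]/ts[last] are always in range (0 ≤ last ≤ curr < len), so getD is exact
-- fuel = ts.length - curr steps remain; structural recursion on fuel, same state (curr, last, res) as the while loop
def splitTsLoopA (ts : List Int) : Nat → Nat → Nat → List (List Int) → List (List Int)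
  | 0, _, _, res => res
  | fuel + 1, curr, last, res =>
    if curr < ts.length then
      if ts.getD curr 0 < ts.getD last 0 then
        splitTsLoopA ts fuel (curr + 1) curr (res ++ [PySem.List.slice ts (some (last : Int)) (some (curr : Int))])
      else
        splitTsLoopA ts fuel (curr + 1) last res
    else res

def split_ts (ts : List Int) : List (List Int) := splitTsLoopA ts ts.length 0 0 []

-- ===== PORT B =====
-- for x in ts with a current-segment buffer; buf[0] only read when buf is nonempty, so headD is exact
def splitTsLoopB (xs : List Int) (buf : List Int) (res : List (List Int)) : List (List Int) :=
  match xs with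
  | [] => res
  | x :: rest =>
    if buf ≠ [] ∧ x < buf.headD 0 then
      splitTsLoopB rest [x] (res ++ [buf])
    else
      splitTsLoopB rest (buf ++ [x]) res

def split_ts_alt (ts : List Int) : List (List Int) := splitTsLoopB ts [] []

-- ===== PRECONDITION & SPEC =====
def Spec_split_ts (ts : List Int) (out : List (List Int)) : Prop := out = split_ts_alt ts
instance (ts : List Int) (out : List (List Int)) : Decidable (Spec_split_ts ts out) := by unfold Spec_split_ts; infer_instance

-- ===== CLAIM (what is proved, stated in full; the proofs are below) =====
def Claim_equal_split_ts : Prop := ∀ (ts : List Int), Dom_split_ts ts → Spec_split_ts ts (split_ts ts)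

-- ===== LEMMAS AND PROOFS =====

-- invariant: A's loop at (curr, last) equals B's loop on the remaining values with buffer = ts[last:curr]
lemma splitTs_loop_eq (ts : List Int) :
    ∀ (n curr last : Nat) (res : List (List Int)), last ≤ curr → ts.length - curr = n →
    splitTsLoopA ts n curr last res = splitTsLoopB (ts.drop curr) ((ts.drop last).take (curr - last)) res := by
  intro n
  induction n with
  | zero =>
      intro curr last res _ hn
      have hge : ts.length ≤ curr := by omega
      rw [splitTsLoopA, List.drop_eq_nil_of_le hge, splitTsLoopB]
  | succ n ih =>
      intro curr last res hlc hn
      have hc : curr < ts.length := by omega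
      have hl : last < ts.length := by omega
      have hdrop : ts.drop curr = ts[curr] :: ts.drop (curr + 1) := List.drop_eq_getElem_cons hc
      rw [splitTsLoopA, if_pos hc, hdrop, splitTsLoopB]
      by_cases hcl : last = curr
      · -- empty buffer: both take the else branch
        subst hcl
        rw [if_neg (by simp), if_neg (by simp)]
        have hbuf : (ts.drop last).take (last - last) ++ [ts[last]] =
            (ts.drop last).take (last + 1 - last) := by
          simp [List.take_add_one, List.getElem?_drop, List.getElem?_eq_getElem hc]
        rw [hbuf]
        exact ih (last + 1) last res (by omega) (by omega)
      · -- nonempty buffer with head ts[last]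
        have hlt : last < curr := by omega
        have hne : (ts.drop last).take (curr - last) ≠ [] := by
          have : ((ts.drop last).take (curr - last)).length = curr - last := by
            rw [List.length_take, List.length_drop]; omega
          intro h; rw [h] at this; simp at this; omega
        have hhead : ((ts.drop last).take (curr - last)).headD 0 = ts[last] := by
          obtain ⟨k, hk⟩ : ∃ k, curr - last = k + 1 := ⟨curr - last - 1, by omega⟩
          rw [hk, List.drop_eq_getElem_cons hl, List.take_succ_cons, List.headD_cons]
        have hgc : ts.getD curr 0 = ts[curr] := List.getD_eq_getElem ts 0 hc
        have hgl : ts.getD last 0 = ts[last] := List.getD_eq_getElem ts 0 hl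
        by_cases hcmp : ts[curr] < ts[last]
        · rw [if_pos (by rw [hgc, hgl]; exact hcmp), if_pos ⟨hne, by rw [hhead]; exact hcmp⟩]
          have hslice : PySem.List.slice ts (some (last : Int)) (some (curr : Int)) =
              (ts.drop last).take (curr - last) := PySem.List.slice_natCast ts last curr
          rw [hslice]
          have hbuf1 : [ts[curr]] = (ts.drop curr).take (curr + 1 - curr) := by
            rw [show curr + 1 - curr = 1 from by omega, List.drop_eq_getElem_cons hc,
                List.take_succ_cons, List.take_zero]
          rw [hbuf1]
          exact ih (curr + 1) curr (res ++ [(ts.drop last).take (curr - last)]) (by omega) (by omega)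
        · rw [if_neg (by rw [hgc, hgl]; exact hcmp),
              if_neg (by rintro ⟨-, h⟩; rw [hhead] at h; exact hcmp h)]
          have hbuf : (ts.drop last).take (curr - last) ++ [ts[curr]] =
              (ts.drop last).take (curr + 1 - last) := by
            have h1 : curr + 1 - last = (curr - last) + 1 := by omega
            rw [h1, List.take_add_one, List.getElem?_drop]
            have h2 : last + (curr - last) = curr := by omega
            rw [h2, List.getElem?_eq_getElem hc]
            rfl
          rw [hbuf]
          exact ih (curr + 1) last res (by omega) (by omega)

-- ===== VERDICT (by name: the statement is the Claim_ definition above) =====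
theorem split_ts_spec : Claim_equal_split_ts := by
  intro ts _
  unfold Spec_split_ts split_ts split_ts_alt
  simpa using splitTs_loop_eq ts ts.length 0 0 [] (le_refl 0) rfl
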